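-- pv_equiv track=rewrite | github.com/menno420/superbot | minebot/cogs/crafting_cog.py | categorize_recipe
-- ===== SOURCE A (Python) =====
-- def categorize_recipe(item_name: str) -> str:
--     name_lower = item_name.lower()
--     if any(kw in name_lower for kw in ["sword", "dagger", "bow", "gun", "mace", "staff"]):
--         return "Weapons"
--     elif any(kw in name_lower for kw in ["helmet", "armour", "chestplate", "boots", "leggings", "shield"]):
--         return "Armour"
--     elif any(kw in name_lower for kw in ["pickaxe", "shovel", "hoe", "axe", "hammer", "tool"]):
--         return "Tools"
--     else:
--         return "Items"
-- ===== SOURCE B (Python) =====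
-- KEYWORD_PRIORITY = {
--     "sword": 0, "dagger": 0, "bow": 0, "gun": 0, "mace": 0, "staff": 0,
--     "helmet": 1, "armour": 1, "chestplate": 1, "boots": 1, "leggings": 1, "shield": 1,
--     "pickaxe": 2, "shovel": 2, "hoe": 2, "axe": 2, "hammer": 2, "tool": 2,
-- }
-- CATEGORY_NAMES = ["Weapons", "Armour", "Tools", "Items"]
--
-- # keywords bucketed by their first character, built once
-- FIRST_CHAR_INDEX = {}
-- for _kw, _pri in KEYWORD_PRIORITY.items():
--     FIRST_CHAR_INDEX.setdefault(_kw[0], []).append((_kw, _pri))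
--
-- def categorize_recipe(item_name: str) -> str:
--     # Single position-wise scan: at each position of the lowered name, prefix-match
--     # only the keywords whose first character occurs there (first-char bucket index)
--     # and keep the minimum category priority seen; index the name table at the end.
--     s = item_name.lower()
--     best = 3
--     for i, ch in enumerate(s):
--         for kw, pri in FIRST_CHAR_INDEX.get(ch, []):
--             if pri < best and s.startswith(kw, i):
--                 best = pri
--     return CATEGORY_NAMES[best]
-- ===== Notes on version B (the rewrite author's own statement) =====
-- stated objective: alternative
-- what changed: Replaced the three staged any(kw in name) substring scans with a single position-wise pass over the lowered name that prefix-matches only the keywords in a first-character bucket index and keeps the minimum category priority, indexing a category-name table at the end.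
import Mathlib
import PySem

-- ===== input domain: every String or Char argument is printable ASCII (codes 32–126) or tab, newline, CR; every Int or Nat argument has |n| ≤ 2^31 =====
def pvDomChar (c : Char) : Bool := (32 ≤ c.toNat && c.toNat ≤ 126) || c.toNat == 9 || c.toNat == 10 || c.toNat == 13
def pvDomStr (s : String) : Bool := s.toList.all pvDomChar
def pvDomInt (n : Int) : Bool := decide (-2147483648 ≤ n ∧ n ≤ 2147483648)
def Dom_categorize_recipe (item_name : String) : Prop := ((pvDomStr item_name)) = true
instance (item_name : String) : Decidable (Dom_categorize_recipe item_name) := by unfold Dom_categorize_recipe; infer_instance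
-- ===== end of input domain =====

-- B replaces A's three staged any(kw in name) substring scans with one position-wise pass over the
-- lowered name, prefix-matching only the keywords in a first-character bucket index and keeping the
-- minimum category priority (alternative algorithm, same asymptotic cost).


-- ===== PORT A =====
def categorize_recipe (item_name : String) : String :=
  let name_lower := PySem.Str.lower item_name
  if ["sword", "dagger", "bow", "gun", "mace", "staff"].any (fun kw => PySem.Str.isIn kw name_lower) then
    "Weapons"
  else if ["helmet", "armour", "chestplate", "boots", "leggings", "shield"].any (fun kw => PySem.Str.isIn kw name_lower) then
    "Armour"
  else if ["pickaxe", "shovel", "hoe", "axe", "hammer", "tool"].any (fun kw => PySem.Str.isIn kw name_lower) then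
    "Tools"
  else
    "Items"

-- ===== PORT B =====
-- keyword -> category-priority map (dict in insertion order), as in Source B
def KEYWORD_PRIORITY : List (List Char × Nat) :=
  [("sword".toList, 0), ("dagger".toList, 0), ("bow".toList, 0), ("gun".toList, 0), ("mace".toList, 0), ("staff".toList, 0),
   ("helmet".toList, 1), ("armour".toList, 1), ("chestplate".toList, 1), ("boots".toList, 1), ("leggings".toList, 1), ("shield".toList, 1),
   ("pickaxe".toList, 2), ("shovel".toList, 2), ("hoe".toList, 2), ("axe".toList, 2), ("hammer".toList, 2), ("tool".toList, 2)]

def CATEGORY_NAMES : List String := ["Weapons", "Armour", "Tools", "Items"]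

-- FIRST_CHAR_INDEX: keywords bucketed by first character (built once, as in Source B;
-- setdefault(kw[0], []).append((kw, pri)) is Dict.modify with default [] appending; kw[0] is headD, keywords are nonempty)
def FIRST_CHAR_INDEX : PySem.Dict Char (List (List Char × Nat)) :=
  KEYWORD_PRIORITY.foldl (fun d p => d.modify (p.1.headD ' ') [] (· ++ [p])) PySem.Dict.empty

-- the inner `for kw, pri in FIRST_CHAR_INDEX.get(ch, []): if pri < best and s.startswith(kw, i): best = pri`
-- (s.startswith(kw, i) is the prefix test on the i-th suffix, which is the list this recursion walks)
def posStep (suffix : List Char) (ch : Char) (best : Nat) : Nat :=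
  (FIRST_CHAR_INDEX.getD ch []).foldl
    (fun b p => if p.2 < b ∧ PySem.Chars.startswith suffix p.1 = true then p.2 else b) best

-- the outer `for i, ch in enumerate(s)`: structural recursion over the suffixes of s
def scanPos : List Char → Nat → Nat
  | [], best => best
  | c :: rest, best => scanPos rest (posStep (c :: rest) c best)

def categorize_recipe_alt (item_name : String) : String :=
  -- CATEGORY_NAMES[best]; the index is always in range (best ≤ 3), so the .getD "" is never taken
  (PySem.List.pyGet? CATEGORY_NAMES ((scanPos (PySem.Str.lower item_name).toList 3 : Nat) : Int)).getD ""

-- ===== PRECONDITION & SPEC =====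
def Spec_categorize_recipe (item_name : String) (out : String) : Prop := out = categorize_recipe_alt item_name
instance (item_name : String) (out : String) : Decidable (Spec_categorize_recipe item_name out) := by unfold Spec_categorize_recipe; infer_instance

-- ===== CLAIM (what is proved, stated in full; the proofs are below) =====
def Claim_equal_categorize_recipe : Prop := ∀ (item_name : String), Dom_categorize_recipe item_name → Spec_categorize_recipe item_name (categorize_recipe item_name)

-- ===== LEMMAS AND PROOFS =====

-- keyword groups as char lists, and `any`-abbreviations used by the characterisation
def wC : List (List Char) := ["sword".toList, "dagger".toList, "bow".toList, "gun".toList, "mace".toList, "staff".toList]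
def aC : List (List Char) := ["helmet".toList, "armour".toList, "chestplate".toList, "boots".toList, "leggings".toList, "shield".toList]
def tC : List (List Char) := ["pickaxe".toList, "shovel".toList, "hoe".toList, "axe".toList, "hammer".toList, "tool".toList]

def anyPref (g : List (List Char)) (s : List Char) : Bool := g.any (fun kw => PySem.Chars.startswith s kw)
def anyIn (g : List (List Char)) (t : List Char) : Bool := g.any (fun kw => PySem.Chars.isIn kw t)

def catMin (t : List Char) : Nat :=
  if anyIn wC t then 0 else if anyIn aC t then 1 else if anyIn tC t then 2 else 3

-- the fold step rewritten into min-form, and the congruence to it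
def stepF (s : List Char) (b : Nat) (p : List Char × Nat) : Nat :=
  if p.2 < b ∧ PySem.Chars.startswith s p.1 = true then p.2 else b

def stepG (s : List Char) (b : Nat) (p : List Char × Nat) : Nat :=
  if PySem.Chars.startswith s p.1 then min b p.2 else b

lemma stepEq (s : List Char) (b : Nat) (p : List Char × Nat) : stepF s b p = stepG s b p := by
  unfold stepF stepG
  by_cases h : PySem.Chars.startswith s p.1 = true <;> by_cases h2 : p.2 < b <;>
    simp [h, h2, Nat.min_def]

lemma fold_congr (s : List Char) : ∀ (ks : List (List Char × Nat)) (b : Nat),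
    ks.foldl (stepF s) b = ks.foldl (stepG s) b := by
  intro ks
  induction ks with
  | nil => intro b; rfl
  | cons p ks ih => intro b; rw [List.foldl_cons, List.foldl_cons, stepEq, ih]

lemma foldG_le (s : List Char) : ∀ (ks : List (List Char × Nat)) (b : Nat),
    ks.foldl (stepG s) b ≤ b := by
  intro ks
  induction ks with
  | nil => intro b; simp
  | cons p ks ih =>
    intro b
    rw [List.foldl_cons]
    refine le_trans (ih _) ?_
    unfold stepG
    split <;> omega

lemma foldG_min (s : List Char) : ∀ (ks : List (List Char × Nat)) (b : Nat), b ≤ 3 →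
    (∀ p ∈ ks, p.2 ≤ 3) →
    ks.foldl (stepG s) b = min b (ks.foldl (stepG s) 3) := by
  intro ks
  induction ks with
  | nil => intro b hb _; simp; omega
  | cons p ks ih =>
    intro b hb hks
    have hp : p.2 ≤ 3 := hks p (by simp)
    have hks' : ∀ q ∈ ks, q.2 ≤ 3 := fun q hq => hks q (by simp [hq])
    rw [List.foldl_cons, List.foldl_cons]
    by_cases h : PySem.Chars.startswith s p.1 = true
    · rw [show stepG s b p = min b p.2 from by simp [stepG, h],
        show stepG s 3 p = min 3 p.2 from by simp [stepG, h],
        ih (min b p.2) (by omega) hks', ih (min 3 p.2) (by omega) hks']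
      omega
    · rw [show stepG s b p = b from by simp [stepG, h],
        show stepG s 3 p = (3 : Nat) from by simp [stepG, h]]
      exact ih b hb hks'

lemma foldG_group (s : List Char) (g : List (List Char)) (k : Nat) : ∀ (b : Nat),
    (g.map (fun kw => (kw, k))).foldl (stepG s) b
      = if anyPref g s then min b k else b := by
  induction g with
  | nil => intro b; simp [anyPref]
  | cons kw g ih =>
    intro b
    simp only [List.map_cons, List.foldl_cons, anyPref, List.any_cons]
    by_cases h : PySem.Chars.startswith s kw = true
    · rw [show stepG s b (kw, k) = min b k from by simp [stepG, h], ih]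
      by_cases h2 : anyPref g s = true <;> simp [h, anyPref] at *
    · rw [show stepG s b (kw, k) = b from by simp [stepG, h], ih]
      simp [h, anyPref]

-- the fold over the WHOLE keyword table (proof-side object the bucketed fold is reduced to)
def posFull (s : List Char) (b : Nat) : Nat := KEYWORD_PRIORITY.foldl (stepG s) b

lemma posFull_three (s : List Char) :
    posFull s 3 = if anyPref wC s then 0 else if anyPref aC s then 1 else if anyPref tC s then 2 else 3 := by
  have hsplit : KEYWORD_PRIORITY
      = (wC.map (fun kw => (kw, 0))) ++ (aC.map (fun kw => (kw, 1))) ++ (tC.map (fun kw => (kw, 2))) := by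
    decide
  unfold posFull
  rw [hsplit, List.foldl_append, List.foldl_append, foldG_group, foldG_group, foldG_group]
  by_cases h1 : anyPref wC s = true <;> by_cases h2 : anyPref aC s = true <;>
    by_cases h3 : anyPref tC s = true <;> simp [h1, h2, h3]

lemma posFull_min (s : List Char) (b : Nat) (hb : b ≤ 3) :
    posFull s b = min b (posFull s 3) :=
  foldG_min s KEYWORD_PRIORITY b hb (by decide)

lemma posFull_le (s : List Char) (b : Nat) : posFull s b ≤ b := foldG_le s KEYWORD_PRIORITY b

lemma startswith_cons_ne (c k : Char) (rest kw : List Char) (h : k ≠ c) :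
    PySem.Chars.startswith (c :: rest) (k :: kw) = false := by
  rw [Bool.eq_false_iff]
  intro hc
  exact h (List.cons_prefix_cons.mp ((PySem.Chars.startswith_iff _ _).mp hc)).1

-- keywords whose first character is not the current one are identity steps, so the
-- bucketed fold equals the fold over the whole table
lemma fold_filter (c : Char) (rest : List Char) :
    ∀ (ks : List (List Char × Nat)), (∀ p ∈ ks, p.1 ≠ []) → ∀ (b : Nat),
    (ks.filter (fun p => p.1.headD ' ' == c)).foldl (stepG (c :: rest)) b
      = ks.foldl (stepG (c :: rest)) b := by
  intro ks
  induction ks with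
  | nil => intro _ b; rfl
  | cons p ks ih =>
    intro hne b
    have hne' : ∀ q ∈ ks, q.1 ≠ [] := fun q hq => hne q (by simp [hq])
    obtain ⟨k, kw, hk⟩ : ∃ k kw, p.1 = k :: kw := by
      cases h : p.1 with
      | nil => exact absurd h (hne p (by simp))
      | cons k kw => exact ⟨k, kw, rfl⟩
    by_cases hc : p.1.headD ' ' == c
    · simp only [List.filter_cons, hc, if_true, List.foldl_cons]
      rw [ih hne']
    · have hkc : k ≠ c := by
        simp [hk] at hc
        exact hc
      simp only [List.filter_cons, hc, if_false, Bool.false_eq_true, List.foldl_cons]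
      rw [ih hne',
        show stepG (c :: rest) b p = b from by
          simp [stepG, hk, startswith_cons_ne c k rest kw hkc]]

lemma bucket_eq (c : Char) :
    FIRST_CHAR_INDEX.getD c [] = KEYWORD_PRIORITY.filter (fun p => p.1.headD ' ' == c) := by
  have h1 : FIRST_CHAR_INDEX
      = (KEYWORD_PRIORITY.map (fun p => (p.1.headD ' ', p))).foldl
          (fun d q => d.modify q.1 [] (· ++ [q.2])) PySem.Dict.empty := by
    rw [List.foldl_map]
    rfl
  rw [h1, PySem.Dict.getD_foldl_modify_append, List.filter_map, List.map_map]
  show PySem.Dict.empty.getD c [] ++ List.map id (KEYWORD_PRIORITY.filter (fun p => p.1.headD ' ' == c))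
      = KEYWORD_PRIORITY.filter (fun p => p.1.headD ' ' == c)
  rw [List.map_id]
  simp [PySem.Dict.empty, PySem.Dict.getD, PySem.Dict.get?]

lemma posStep_eq (c : Char) (rest : List Char) (b : Nat) :
    posStep (c :: rest) c b = posFull (c :: rest) b := by
  unfold posStep posFull
  rw [show (fun (b : Nat) (p : List Char × Nat) =>
        if p.2 < b ∧ PySem.Chars.startswith (c :: rest) p.1 = true then p.2 else b)
      = stepF (c :: rest) from rfl,
    fold_congr, bucket_eq, fold_filter c rest KEYWORD_PRIORITY (by decide)]

lemma isIn_cons (kw : List Char) (c : Char) (rest : List Char) :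
    PySem.Chars.isIn kw (c :: rest)
      = (PySem.Chars.startswith (c :: rest) kw || PySem.Chars.isIn kw rest) := by
  by_cases h : kw <:+: (c :: rest)
  · rw [(PySem.Chars.isIn_iff_infix _ _).mpr h]
    rcases (List.infix_cons_iff).mp h with hp | hi
    · simp [(PySem.Chars.startswith_iff _ _).mpr hp]
    · simp [(PySem.Chars.isIn_iff_infix _ _).mpr hi]
  · rw [(PySem.Chars.isIn_eq_false_iff _ _).mpr h]
    have h1 : PySem.Chars.startswith (c :: rest) kw = false := by
      rw [Bool.eq_false_iff]
      intro hc
      exact h (List.infix_cons_iff.mpr (Or.inl ((PySem.Chars.startswith_iff _ _).mp hc)))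
    have h2 : PySem.Chars.isIn kw rest = false := by
      rw [PySem.Chars.isIn_eq_false_iff]
      intro hc
      exact h (List.infix_cons_iff.mpr (Or.inr hc))
    simp [h1, h2]

lemma anyIn_cons (g : List (List Char)) (c : Char) (rest : List Char) :
    anyIn g (c :: rest) = (anyPref g (c :: rest) || anyIn g rest) := by
  induction g with
  | nil => simp [anyIn, anyPref]
  | cons kw g ih =>
    simp only [anyIn, anyPref, List.any_cons] at *
    rw [isIn_cons, ih]
    cases PySem.Chars.startswith (c :: rest) kw <;> cases PySem.Chars.isIn kw rest <;> simp

lemma scanPos_char : ∀ (t : List Char) (b : Nat), b ≤ 3 → scanPos t b = min b (catMin t) := by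
  intro t
  induction t with
  | nil =>
    intro b hb
    have : catMin [] = 3 := by decide
    simp [scanPos, this]
    omega
  | cons c rest ih =>
    intro b hb
    have hle : posStep (c :: rest) c b ≤ 3 := by
      rw [posStep_eq]; exact le_trans (posFull_le _ _) hb
    rw [scanPos, ih _ hle, posStep_eq, posFull_min _ _ hb, posFull_three]
    unfold catMin
    rw [anyIn_cons wC, anyIn_cons aC, anyIn_cons tC]
    by_cases h1 : anyPref wC (c :: rest) = true <;>
      by_cases h2 : anyPref aC (c :: rest) = true <;>
      by_cases h3 : anyPref tC (c :: rest) = true <;>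
      by_cases h4 : anyIn wC rest = true <;>
      by_cases h5 : anyIn aC rest = true <;>
      by_cases h6 : anyIn tC rest = true <;>
      simp [h1, h2, h3, h4, h5, h6]

-- ===== VERDICT (by name: the statement is the Claim_ definition above) =====
theorem categorize_recipe_spec : Claim_equal_categorize_recipe := by
  intro item_name _
  unfold Spec_categorize_recipe categorize_recipe categorize_recipe_alt
  rw [scanPos_char _ 3 (le_refl 3)]
  set t := (PySem.Str.lower item_name).toList with ht
  have hw : (["sword", "dagger", "bow", "gun", "mace", "staff"].any
      (fun kw => PySem.Str.isIn kw (PySem.Str.lower item_name))) = anyIn wC t := by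
    simp [anyIn, wC, PySem.Str.isIn_eq, ht]
  have ha : (["helmet", "armour", "chestplate", "boots", "leggings", "shield"].any
      (fun kw => PySem.Str.isIn kw (PySem.Str.lower item_name))) = anyIn aC t := by
    simp [anyIn, aC, PySem.Str.isIn_eq, ht]
  have htl : (["pickaxe", "shovel", "hoe", "axe", "hammer", "tool"].any
      (fun kw => PySem.Str.isIn kw (PySem.Str.lower item_name))) = anyIn tC t := by
    simp [anyIn, tC, PySem.Str.isIn_eq, ht]
  simp only [hw, ha, htl, catMin]
  by_cases h1 : anyIn wC t = true <;> by_cases h2 : anyIn aC t = true <;>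
    by_cases h3 : anyIn tC t = true <;>
    simp [h1, h2, h3, CATEGORY_NAMES, PySem.List.pyGet?, PySem.List.pyIdx?]
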